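-- pv_equiv track=rewrite | github.com/AakashBelide/DSA | Arrays/6arruni.py | doUnion
-- ===== SOURCE A (Python) =====
-- def doUnion(a,n,b,m):
--     c = []
--     for i in range(n):
--         if(a[i] not in c):
--             c.append(a[i])
--     for j in range(m):
--         if(b[j] not in c):
--             c.append(b[j])
--     return len(c)
-- ===== SOURCE B (Python) =====
-- def doUnion(a, n, b, m):
--     xs = sorted(a[:max(n, 0)] + b[:max(m, 0)])
--     count = 0
--     prev = None
--     for x in xs:
--         if prev is None or x != prev:
--             count += 1
--         prev = x
--     return count
-- ===== Notes on version B (the rewrite author's own statement) =====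
-- stated objective: faster
-- what changed: Replaces A's quadratic build-a-dedup-list-with-membership-scans by sort-then-count-adjacent-distinct in one linear pass over the sorted combined prefix.
import Mathlib
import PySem

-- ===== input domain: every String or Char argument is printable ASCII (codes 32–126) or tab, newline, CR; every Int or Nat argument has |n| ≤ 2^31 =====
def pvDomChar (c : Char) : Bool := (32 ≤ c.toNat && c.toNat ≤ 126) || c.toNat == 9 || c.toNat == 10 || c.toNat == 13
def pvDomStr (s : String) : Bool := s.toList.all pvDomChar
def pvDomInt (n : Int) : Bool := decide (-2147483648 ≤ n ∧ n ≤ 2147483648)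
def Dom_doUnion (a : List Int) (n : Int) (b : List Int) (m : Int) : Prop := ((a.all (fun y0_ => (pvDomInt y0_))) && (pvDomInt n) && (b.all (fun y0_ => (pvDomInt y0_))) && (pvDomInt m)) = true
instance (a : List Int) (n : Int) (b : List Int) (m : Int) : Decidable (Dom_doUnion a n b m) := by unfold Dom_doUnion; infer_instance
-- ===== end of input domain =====

-- B replaces A's quadratic membership-scan dedup by sort + one linear pass counting
-- adjacent-distinct elements (objective: alternative algorithm, asymptotically cheaper).

-- ===== PORT A =====
-- literal port: two index loops appending a[i]/b[j] to c when not yet present, return len(c)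
def doUnion (a : List Int) (n : Int) (b : List Int) (m : Int) : Int :=
  let c := (PySem.List.pyRange 0 n 1).foldl
    (fun c i => let x := PySem.List.pyGetD a i 0; if x ∈ c then c else c ++ [x]) []
  let c := (PySem.List.pyRange 0 m 1).foldl
    (fun c j => let x := PySem.List.pyGetD b j 0; if x ∈ c then c else c ++ [x]) c
  (c.length : Int)

-- ===== PORT B =====
-- literal port of Source B: sort the combined clamped prefixes, then fold with (count, prev)
def doUnion_alt (a : List Int) (n : Int) (b : List Int) (m : Int) : Int :=
  let xs := PySem.List.sorted
    (PySem.List.slice a none (some (max n 0)) ++ PySem.List.slice b none (some (max m 0)))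
    (fun x => x) false
  let s := xs.foldl
    (fun (s : Int × Option Int) x =>
      ((if s.2 = none ∨ s.2 ≠ some x then s.1 + 1 else s.1), some x)) (0, none)
  s.1

-- ===== PRECONDITION & SPEC =====
-- Pre_ excludes exactly the inputs where A raises IndexError (index loop past the list's end)
def Pre_doUnion (a : List Int) (n : Int) (b : List Int) (m : Int) : Prop :=
  n ≤ (a.length : Int) ∧ m ≤ (b.length : Int)
instance (a : List Int) (n : Int) (b : List Int) (m : Int) : Decidable (Pre_doUnion a n b m) := by unfold Pre_doUnion; infer_instance
def pvWitness_doUnion : List Int × Int × List Int × Int := ([1, 2, 2], 3, [2, 3], 2)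

def Spec_doUnion (a : List Int) (n : Int) (b : List Int) (m : Int) (out : Int) : Prop := out = doUnion_alt a n b m
instance (a : List Int) (n : Int) (b : List Int) (m : Int) (out : Int) : Decidable (Spec_doUnion a n b m out) := by unfold Spec_doUnion; infer_instance

-- ===== CLAIM (what is proved, stated in full; the proofs are below) =====
def Claim_equal_doUnion : Prop := ∀ (a : List Int) (n : Int) (b : List Int) (m : Int), Dom_doUnion a n b m → Pre_doUnion a n b m → Spec_doUnion a n b m (doUnion a n b m)

-- ===== LEMMAS AND PROOFS =====

-- A's index loop over a valid prefix is the fold of the dedup step over the prefix itself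
lemma doUnion_loopA (xs : List Int) (k : Int) (c : List Int)
    (hk : k ≤ (xs.length : Int)) :
    (PySem.List.pyRange 0 k 1).foldl
      (fun c i => let x := PySem.List.pyGetD xs i 0; if x ∈ c then c else c ++ [x]) c
    = (xs.take k.toNat).foldl (fun c x => if x ∈ c then c else c ++ [x]) c := by
  by_cases h0 : 0 ≤ k
  · have hlen : ((xs.take k.toNat).length : Int) = k := by
      simp [List.length_take]; omega
    have hcongr : (PySem.List.pyRange 0 k 1).foldl
        (fun c i => let x := PySem.List.pyGetD xs i 0; if x ∈ c then c else c ++ [x]) c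
        = (PySem.List.pyRange 0 k 1).foldl
        (fun c i => let x := PySem.List.pyGetD (xs.take k.toNat) i 0; if x ∈ c then c else c ++ [x]) c := by
      apply PySem.List.foldl_congr_mem
      intro acc i hi
      rw [PySem.List.mem_pyRange_one] at hi
      have h1 : PySem.List.pyGetD xs i 0 = PySem.List.pyGetD (xs.take k.toNat) i 0 := by
        rw [PySem.List.pyGetD_eq_getElem xs 0 hi.1 (by omega),
            PySem.List.pyGetD_eq_getElem (xs.take k.toNat) 0 hi.1 (by rw [hlen]; exact hi.2)]
        rw [List.getElem_take]
      simp only [h1]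
    rw [hcongr]
    have hfold := PySem.List.foldl_pyRange_zero_pyGetD' (xs.take k.toNat) 0
      (fun c x => if x ∈ c then c else c ++ [x]) c
    rw [hlen] at hfold
    exact hfold
  · rw [PySem.List.pyRange_one_eq_nil (by omega)]
    have : k.toNat = 0 := Int.toNat_of_nonpos (by omega)
    simp [this]

-- the dedup step is PySem.Set.add, so the fold from [] is PySem.Set.ofList
lemma doUnion_fold_set (L : List Int) (c : List Int) :
    L.foldl (fun c x => if x ∈ c then c else c ++ [x]) c
    = L.foldl PySem.Set.add c := by
  apply PySem.List.foldl_congr_mem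
  intro acc x _
  simp [PySem.Set.add, PySem.Set.contains]

-- insert-card counted through erase (used twice below)
lemma doUnion_card_insert (s : Finset Int) (x : Int) :
    (insert x s).card = (s.erase x).card + 1 := by
  have h : insert x s = insert x (s.erase x) := by
    ext y; simp [Finset.mem_insert, Finset.mem_erase]; tauto
  rw [h, Finset.card_insert_of_notMem (Finset.notMem_erase x _)]

-- B's (count, prev)-fold on a sorted tail counts the distinct elements other than prev
lemma doUnion_loopB (ys : List Int) : ∀ (c p : Int),
    ys.Pairwise (· ≤ ·) → (∀ y ∈ ys, p ≤ y) →
    (ys.foldl (fun (s : Int × Option Int) x =>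
      ((if s.2 = none ∨ s.2 ≠ some x then s.1 + 1 else s.1), some x)) (c, some p)).1
    = c + (((ys.toFinset.erase p).card : Nat) : Int) := by
  induction ys with
  | nil => intro c p _ _; simp
  | cons x t ih =>
    intro c p hpw hle
    have hxt : ∀ y ∈ t, x ≤ y := (List.pairwise_cons.mp hpw).1
    have htpw : t.Pairwise (· ≤ ·) := (List.pairwise_cons.mp hpw).2
    by_cases hxp : x = p
    · subst hxp
      simp only [List.foldl_cons]
      have hstep : ((if (some x : Option Int) = none ∨ (some x : Option Int) ≠ some x then c + 1 else c), some x) = (c, some x) := by simp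
      rw [hstep, ih c x htpw hxt]
      congr 2
      rw [List.toFinset_cons, Finset.erase_insert_eq_erase]
    · simp only [List.foldl_cons]
      have hpx' : ¬ (p = x) := fun h => hxp h.symm
      have hstep : ((if (some p : Option Int) = none ∨ (some p : Option Int) ≠ some x then c + 1 else c), some x) = (c + 1, some x) := by
        simp [hpx']
      rw [hstep, ih (c + 1) x htpw hxt]
      have hpx : p < x := lt_of_le_of_ne (hle x (List.mem_cons_self ..)) hpx'
      have hpt : p ∉ t := fun hmem => absurd (hxt p hmem) (by omega)
      have hfin : (x :: t).toFinset.erase p = insert x t.toFinset := by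
        rw [List.toFinset_cons]
        exact Finset.erase_eq_of_notMem (by simp [hpt, hpx'])
      rw [hfin, doUnion_card_insert]
      push_cast
      ring

-- B's whole loop counts the distinct elements of a sorted list
lemma doUnion_count_sorted (ys : List Int) (hpw : ys.Pairwise (· ≤ ·)) :
    (ys.foldl (fun (s : Int × Option Int) x =>
      ((if s.2 = none ∨ s.2 ≠ some x then s.1 + 1 else s.1), some x)) (0, none)).1
    = (ys.toFinset.card : Int) := by
  cases ys with
  | nil => simp
  | cons x t =>
    have hxt : ∀ y ∈ t, x ≤ y := (List.pairwise_cons.mp hpw).1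
    have htpw : t.Pairwise (· ≤ ·) := (List.pairwise_cons.mp hpw).2
    simp only [List.foldl_cons]
    rw [show ((if True ∨ (none : Option Int) ≠ some x then (0:Int) + 1 else 0), some x) = ((1:Int), some x) by simp]
    rw [doUnion_loopB t 1 x htpw hxt, List.toFinset_cons, doUnion_card_insert]
    push_cast
    ring

-- a fold of Set.add from the empty set has the length of the distinct-element Finset
lemma doUnion_set_card (L : List Int) :
    ((L.foldl PySem.Set.add ([] : List Int)).length : Int) = (L.toFinset.card : Int) := by
  rw [← PySem.Set.ofList_eq_foldl]
  have hnd : (PySem.Set.ofList L).Nodup := PySem.Set.nodup_ofList L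
  have hmem : (PySem.Set.ofList L).toFinset = L.toFinset := by
    ext x
    simp [List.mem_toFinset, PySem.Set.mem_ofList]
  rw [← hmem, List.toFinset_card_of_nodup hnd]

-- the clamped slice a[:max(n,0)] is the prefix take n.toNat
lemma doUnion_slice_take (xs : List Int) (k : Int) :
    PySem.List.slice xs none (some (max k 0)) = xs.take k.toNat := by
  rw [← Int.toNat_eq_max, PySem.List.slice_to_natCast]

-- ===== VERDICT (by name: the statement is the Claim_ definition above) =====
theorem doUnion_spec : Claim_equal_doUnion := by
  intro a n b m _ hpre
  obtain ⟨hn, hm⟩ := hpre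
  unfold Spec_doUnion doUnion doUnion_alt
  simp only [doUnion_slice_take]
  rw [doUnion_loopA a n [] hn, doUnion_loopA b m _ hm,
      ← List.foldl_append, doUnion_fold_set, doUnion_set_card]
  set L := a.take n.toNat ++ b.take m.toNat with hL
  have hfin : (PySem.List.sorted L (fun x => x) false).toFinset = L.toFinset := by
    ext x
    simp [List.mem_toFinset, PySem.List.mem_sorted]
  rw [doUnion_count_sorted _ (PySem.List.sorted_pairwise L (fun x => x)), hfin]
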